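-- pv_equiv track=rewrite | github.com/pypi-data/pypi-mirror-400 | packages/fc-client-docker/fc_client_docker-0.8.9.tar.gz/fc_client_docker-0.8.9/fc_mcp/mcp_plugins/external/uboot_mcp.py | _find_board_config_file
-- ===== SOURCE A (Python) =====
-- from typing import Any, Dict, List, Optional
--
-- def _find_board_config_file(
--     board_name: str, available_files: List[str]
-- ) -> Optional[str]:
--     """Find the appropriate config file for the given board name"""
--     # Normalize board name
--     normalized_board = board_name.lower().replace("-", "").replace("_", "")
--
--     # Try exact match first
--     for filename in available_files:
--         file_board = (
--             filename.replace("_uboot_env_daily.txt", "")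
--             .replace("-", "")
--             .replace("_", "")
--         )
--         if normalized_board == file_board.lower():
--             return filename
--
--     # Try partial match
--     for filename in available_files:
--         file_board = filename.replace("_uboot_env_daily.txt", "")
--         if normalized_board in file_board.lower().replace("-", "").replace("_", ""):
--             return filename
--
--     return None
-- ===== SOURCE B (Python) =====
-- from typing import List, Optional
--
--
-- def _find_board_config_file(
--     board_name: str, available_files: List[str]
-- ) -> Optional[str]:
--     """Walk the list right-to-left, keeping the leftmost exact and leftmost
--     partial match in two overwrite slots; no early return, no second scan."""
--     normalized = board_name.lower().replace("-", "").replace("_", "")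
--     best_exact = None
--     best_partial = None
--     for filename in reversed(available_files):
--         stripped = filename.replace("_uboot_env_daily.txt", "")
--         if normalized == stripped.replace("-", "").replace("_", "").lower():
--             best_exact = filename
--         elif normalized in stripped.lower().replace("-", "").replace("_", ""):
--             best_partial = filename
--     return best_exact if best_exact is not None else best_partial
-- ===== Notes on version B (the rewrite author's own statement) =====
-- stated objective: alternative
-- what changed: A's two forward scans with early returns are replaced by a single right-to-left pass that overwrites two slots (leftmost exact, leftmost partial) and picks between them after the loop.
import Mathlib
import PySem

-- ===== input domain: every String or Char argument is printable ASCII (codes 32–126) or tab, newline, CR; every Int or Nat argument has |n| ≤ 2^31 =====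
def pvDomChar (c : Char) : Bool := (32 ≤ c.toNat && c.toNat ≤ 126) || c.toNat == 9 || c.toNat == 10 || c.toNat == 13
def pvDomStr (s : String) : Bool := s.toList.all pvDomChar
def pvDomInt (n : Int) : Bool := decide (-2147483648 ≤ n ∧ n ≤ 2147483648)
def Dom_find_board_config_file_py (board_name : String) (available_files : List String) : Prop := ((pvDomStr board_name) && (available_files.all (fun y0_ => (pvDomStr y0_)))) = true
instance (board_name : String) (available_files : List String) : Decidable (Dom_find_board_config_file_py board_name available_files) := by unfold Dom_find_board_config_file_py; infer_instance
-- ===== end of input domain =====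

-- B replaces A's two forward scans (each with early return) by one right-to-left
-- pass keeping two overwrite slots (leftmost exact / leftmost partial), chosen
-- after the loop (objective: alternative — same cost, different traversal).


-- ===== PORT A =====
-- board_name.lower().replace("-","").replace("_","")
def pvNorm (board_name : String) : String :=
  PySem.Str.replace (PySem.Str.replace (PySem.Str.lower board_name) "-" "") "_" ""

-- first loop of A: file_board = filename.replace(suffix,"").replace("-","").replace("_",""); return on normalized == file_board.lower()
def pvLoopExact (nb : String) : List String → Option String
  | [] => none
  | f :: rest =>
    let file_board :=
      PySem.Str.replace (PySem.Str.replace (PySem.Str.replace f "_uboot_env_daily.txt" "") "-" "") "_" ""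
    if nb = PySem.Str.lower file_board then some f else pvLoopExact nb rest

-- second loop of A: file_board = filename.replace(suffix,""); return on normalized in file_board.lower().replace("-","").replace("_","")
def pvLoopPartial (nb : String) : List String → Option String
  | [] => none
  | f :: rest =>
    let file_board := PySem.Str.replace f "_uboot_env_daily.txt" ""
    if PySem.Str.isIn nb (PySem.Str.replace (PySem.Str.replace (PySem.Str.lower file_board) "-" "") "_" "")
    then some f else pvLoopPartial nb rest

def find_board_config_file_py (board_name : String) (available_files : List String) : Option String :=
  let nb := pvNorm board_name
  match pvLoopExact nb available_files with
  | some f => some f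
  | none => pvLoopPartial nb available_files

-- ===== PORT B =====
-- loop body of Source B: overwrite the exact slot, elif the partial slot
def pvStep (nb : String) (st : Option String × Option String) (filename : String) :
    Option String × Option String :=
  let stripped := PySem.Str.replace filename "_uboot_env_daily.txt" ""
  if nb = PySem.Str.lower (PySem.Str.replace (PySem.Str.replace stripped "-" "") "_" "") then
    (some filename, st.2)
  else if PySem.Str.isIn nb (PySem.Str.replace (PySem.Str.replace (PySem.Str.lower stripped) "-" "") "_" "") then
    (st.1, some filename)
  else st

def find_board_config_file_py_alt (board_name : String) (available_files : List String) : Option String :=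
  let normalized :=
    PySem.Str.replace (PySem.Str.replace (PySem.Str.lower board_name) "-" "") "_" ""
  let st := available_files.reverse.foldl (pvStep normalized) (none, none)
  match st.1 with
  | some e => some e
  | none => st.2

-- ===== PRECONDITION & SPEC =====
def Spec_find_board_config_file_py (board_name : String) (available_files : List String) (out : Option String) : Prop := out = find_board_config_file_py_alt board_name available_files
instance (board_name : String) (available_files : List String) (out : Option String) : Decidable (Spec_find_board_config_file_py board_name available_files out) := by unfold Spec_find_board_config_file_py; infer_instance

-- ===== CLAIM (what is proved, stated in full; the proofs are below) =====
def Claim_equal_find_board_config_file_py : Prop := ∀ (board_name : String) (available_files : List String), Dom_find_board_config_file_py board_name available_files → Spec_find_board_config_file_py board_name available_files (find_board_config_file_py board_name available_files)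

-- ===== LEMMAS AND PROOFS =====
-- abbreviation for B's fold over the reversed list
def pvScan (nb : String) (fs : List String) : Option String × Option String :=
  fs.reverse.foldl (pvStep nb) (none, none)

theorem pvScan_cons (nb f : String) (rest : List String) :
    pvScan nb (f :: rest) = pvStep nb (pvScan nb rest) f := by
  simp [pvScan, List.foldl_append]

-- the exact slot holds the leftmost exact match
theorem pvScan_fst (nb : String) (fs : List String) :
    (pvScan nb fs).1 = pvLoopExact nb fs := by
  induction fs with
  | nil => simp [pvScan, pvLoopExact]
  | cons f rest ih =>
    rw [pvScan_cons]
    by_cases he : nb = PySem.Str.lower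
        (PySem.Str.replace (PySem.Str.replace (PySem.Str.replace f "_uboot_env_daily.txt" "") "-" "") "_" "")
    · simp [pvStep, pvLoopExact, he]
    · simp only [pvStep, he, reduceIte]
      split <;> simp [pvLoopExact, he, ih]

-- when there is no exact match anywhere, the partial slot is the leftmost partial match
theorem pvScan_snd (nb : String) (fs : List String)
    (h : pvLoopExact nb fs = none) :
    (pvScan nb fs).2 = pvLoopPartial nb fs := by
  induction fs with
  | nil => simp [pvScan, pvLoopPartial]
  | cons f rest ih =>
    rw [pvScan_cons]
    by_cases he : nb = PySem.Str.lower
        (PySem.Str.replace (PySem.Str.replace (PySem.Str.replace f "_uboot_env_daily.txt" "") "-" "") "_" "")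
    · exfalso; simp [pvLoopExact, he] at h
    · simp only [pvLoopExact, he, reduceIte] at h
      simp only [pvStep, pvLoopPartial, he, reduceIte]
      split <;> simp [ih h]

-- ===== VERDICT (by name: the statement is the Claim_ definition above) =====
theorem find_board_config_file_py_spec : Claim_equal_find_board_config_file_py := by
  intro board_name available_files _
  unfold Spec_find_board_config_file_py find_board_config_file_py find_board_config_file_py_alt
  show _ = (match (pvScan (pvNorm board_name) available_files).1 with
    | some e => some e
    | none => (pvScan (pvNorm board_name) available_files).2)
  rw [pvScan_fst]
  cases h : pvLoopExact (pvNorm board_name) available_files with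
  | some f => simp [h]
  | none => simp [h, pvScan_snd _ _ h]
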